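-- pv_equiv track=rewrite | github.com/Kasirocswell/JMUD-Client | app.py | format_inventory_display
-- ===== SOURCE A (Python) =====
-- def format_inventory_display(message: str) -> str:
--     """Format inventory display with detailed item information"""
--     lines = message.split('\n')
--     header = lines[0].strip()
--
--     formatted = f"""
-- {header}
--
-- """
--
--     current_type = None
--     for line in lines[1:]:
--         if not line.strip():
--             continue
--
--         if line.endswith(':'):  # Type header
--             if current_type:  # Add space between sections
--                 formatted += "\n"
--             current_type = line
--             formatted += f"{current_type}\n"
--         elif line.startswith('  '):  # Item line
--             item = line.strip()
--             if '(x' in item: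
--                 name, count = item.rsplit(' ', 1)
--                 formatted += f"  {name:<25} {count:>5} | Lvl 1 | 150 cr | 2.5 kg\n"
--             else:
--                 formatted += f"  {item:<30} | Lvl 1 | 100 cr | 3.0 kg\n"
--
--     return formatted
-- ===== SOURCE B (Python) =====
-- def format_inventory_display(message: str) -> str:
--     """Group the lines into leading items and header-led sections, then render."""
--     lines = message.split('\n')
--     header = lines[0].strip()
--     leading = []
--     sections = []  # list of (header_line, [item strings])
--     for line in lines[1:]:
--         if not line.strip():
--             continue
--         if line.endswith(':'):
--             sections.append((line, []))
--         elif line.startswith('  '):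
--             item = line.strip()
--             if sections:
--                 sections[-1][1].append(item)
--             else:
--                 leading.append(item)
--     body = "\n".join(h + "\n" + "".join(_format_item(i) for i in items)
--                      for h, items in sections)
--     return f"\n{header}\n\n" + "".join(_format_item(i) for i in leading) + body
--
--
-- def _format_item(item: str) -> str:
--     if '(x' in item:
--         name, count = item.rsplit(' ', 1)
--         return f"  {name:<25} {count:>5} | Lvl 1 | 150 cr | 2.5 kg\n"
--     return f"  {item:<30} | Lvl 1 | 100 cr | 3.0 kg\n"
-- ===== Notes on version B (the rewrite author's own statement) =====
-- stated objective: alternative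
-- what changed: A's single stateful loop (a current-type flag deciding when to emit a separator while concatenating into one string) is replaced by an explicit two-pass decomposition: first group the lines into leading items and header-led sections, then render each section and join the renders with a newline.
import Mathlib
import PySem

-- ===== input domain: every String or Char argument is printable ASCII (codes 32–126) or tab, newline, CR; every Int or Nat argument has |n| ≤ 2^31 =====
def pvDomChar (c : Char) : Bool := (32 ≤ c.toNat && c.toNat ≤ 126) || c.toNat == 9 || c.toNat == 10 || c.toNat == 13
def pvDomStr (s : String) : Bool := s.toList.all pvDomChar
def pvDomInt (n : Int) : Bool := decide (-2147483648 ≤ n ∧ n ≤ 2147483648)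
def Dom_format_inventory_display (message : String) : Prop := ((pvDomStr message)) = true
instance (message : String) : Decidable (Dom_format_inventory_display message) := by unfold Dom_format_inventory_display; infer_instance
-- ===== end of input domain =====

-- B replaces A's stateful current_type/separator loop by an explicit two-pass
-- decomposition: group the lines into leading items and header-led sections,
-- then render the sections and join the renders (objective: alternative).

-- ===== PORT A =====
-- item.rsplit(' ', 1) for an item with at least one space (Python raises
-- ValueError when there is none; Pre_ excludes exactly those inputs).
def pvRsplit1 (item : String) : String × String :=
  let i := PySem.Str.rfind item " "
  if i < 0 then ("", item)   -- Python raises ValueError here; outside Pre_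
  else (PySem.Str.slice item none (some i), PySem.Str.slice item (some (i + 1)) none)

-- f"  {name:<25} …" / f"  {item:<30} …": left-/right-justify to a minimum
-- width, counting code points (exact on the ASCII domain).
def pvLjust (s : String) (w : Nat) : String :=
  s ++ String.ofList (List.replicate (w - s.toList.length) ' ')

def pvRjust (s : String) (w : Nat) : String :=
  String.ofList (List.replicate (w - s.toList.length) ' ') ++ s

-- the item-formatting code, textually identical in A's loop body and in B's
-- _format_item helper, so both ports share this transliteration of it
def pvFmtItem (item : String) : String :=
  if PySem.Str.isIn "(x" item then
    let nc := pvRsplit1 item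
    "  " ++ pvLjust nc.1 25 ++ " " ++ pvRjust nc.2 5 ++ " | Lvl 1 | 150 cr | 2.5 kg\n"
  else
    "  " ++ pvLjust item 30 ++ " | Lvl 1 | 100 cr | 3.0 kg\n"

def format_inventory_display (message : String) : String :=
  let lines := (PySem.Str.split? message "\n").getD []
  let header := PySem.Str.strip (lines.headD "")
  let formatted := "\n" ++ header ++ "\n\n"
  let res := (lines.drop 1).foldl (fun (st : String × Option String) line =>
      if PySem.Str.strip line = "" then st
      else if PySem.Str.endswith line ":" then
        -- current_type is None or a line ending in ':' (nonempty), so Python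
        -- truthiness of current_type is exactly isSome
        ((if st.2.isSome then st.1 ++ "\n" else st.1) ++ line ++ "\n", some line)
      else if PySem.Str.startswith line "  " then
        (st.1 ++ pvFmtItem (PySem.Str.strip line), st.2)
      else st)
    (formatted, none)
  res.1

-- ===== PORT B =====
-- sections[-1][1].append(item): append the item to the last section
def pvAppendLast : List (String × List String) → String → List (String × List String)
  | [], _ => []
  | [(h, its)], it => [(h, its ++ [it])]
  | s :: rest, it => s :: pvAppendLast rest it

-- ''.join of the formatted items
def pvJoinItems (items : List String) : String :=
  String.join (items.map pvFmtItem)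

-- h + "\n" + ''.join(_format_item(i) for i in items)
def pvRenderSec (sec : String × List String) : String :=
  sec.1 ++ "\n" ++ pvJoinItems sec.2

-- "\n".join(...)
def pvIntercalate : List String → String
  | [] => ""
  | [x] => x
  | x :: y :: xs => x ++ "\n" ++ pvIntercalate (y :: xs)

def format_inventory_display_alt (message : String) : String :=
  let lines := (PySem.Str.split? message "\n").getD []
  let header := PySem.Str.strip (lines.headD "")
  let st := (lines.drop 1).foldl
    (fun (st : List String × List (String × List String)) line =>
      if PySem.Str.strip line = "" then st
      else if PySem.Str.endswith line ":" then (st.1, st.2 ++ [(line, [])])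
      else if PySem.Str.startswith line "  " then
        if st.2.isEmpty then (st.1 ++ [PySem.Str.strip line], st.2)
        else (st.1, pvAppendLast st.2 (PySem.Str.strip line))
      else st)
    ([], [])
  "\n" ++ header ++ "\n\n" ++ pvJoinItems st.1 ++ pvIntercalate (st.2.map pvRenderSec)

-- ===== PRECONDITION & SPEC =====
-- Pre_ excludes exactly the inputs on which A raises ValueError: a non-blank
-- item line (two leading spaces, no trailing colon) whose stripped text
-- contains the open-paren-x count marker but no space at all, so that the
-- two-variable unpacking of the rsplit result fails.
def Pre_format_inventory_display (message : String) : Prop :=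
  (((PySem.Str.split? message "\n").getD []).drop 1).all (fun line =>
    !(!(PySem.Str.strip line == "")
      && !PySem.Str.endswith line ":"
      && PySem.Str.startswith line "  "
      && PySem.Str.isIn "(x" (PySem.Str.strip line)
      && !PySem.Str.isIn " " (PySem.Str.strip line))) = true
instance (message : String) : Decidable (Pre_format_inventory_display message) := by
  unfold Pre_format_inventory_display; infer_instance
def pvWitness_format_inventory_display : String :=
  "Inventory:\nWeapons:\n  Sword (x2)\n  Shield"
def Spec_format_inventory_display (message : String) (out : String) : Prop := out = format_inventory_display_alt message
instance (message : String) (out : String) : Decidable (Spec_format_inventory_display message out) := by unfold Spec_format_inventory_display; infer_instance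

-- ===== CLAIM (what is proved, stated in full; the proofs are below) =====
def Claim_equal_format_inventory_display : Prop := ∀ (message : String), Dom_format_inventory_display message → Pre_format_inventory_display message → Spec_format_inventory_display message (format_inventory_display message)

-- ===== LEMMAS AND PROOFS =====

-- right-recursive grouping of the tail lines: (items before the first header,
-- sections); used only by the proofs to characterise both folds
def pvGroup : List String → List String × List (String × List String)
  | [] => ([], [])
  | line :: ls =>
    if PySem.Str.strip line = "" then pvGroup ls
    else if PySem.Str.endswith line ":" then ([], (line, (pvGroup ls).1) :: (pvGroup ls).2)
    else if PySem.Str.startswith line "  " then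
      (PySem.Str.strip line :: (pvGroup ls).1, (pvGroup ls).2)
    else pvGroup ls

-- what A's loop appends after the prefix, given whether a header was seen
def pvTailRender (b : Bool) (g : List String × List (String × List String)) : String :=
  pvJoinItems g.1 ++
    (if b then String.join (g.2.map (fun s => "\n" ++ pvRenderSec s))
     else pvIntercalate (g.2.map pvRenderSec))

theorem pvFoldlAppend (l : List String) (a : String) :
    l.foldl (· ++ ·) a = a ++ l.foldl (· ++ ·) "" := by
  induction l generalizing a with
  | nil => simp
  | cons x xs ih =>
    simp only [List.foldl]
    rw [ih, ih ("" ++ x), String.empty_append, String.append_assoc]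

theorem pvJoin_cons (x : String) (xs : List String) :
    String.join (x :: xs) = x ++ String.join xs := by
  simp only [String.join, List.foldl]
  rw [pvFoldlAppend, String.empty_append]

theorem pvJoinItems_nil : pvJoinItems [] = "" := rfl

theorem pvJoinItems_cons (x : String) (xs : List String) :
    pvJoinItems (x :: xs) = pvFmtItem x ++ pvJoinItems xs := by
  simp only [pvJoinItems, List.map]; exact pvJoin_cons _ _

theorem pvIntercalate_cons (x : String) (xs : List String) :
    pvIntercalate (x :: xs) = x ++ String.join (xs.map (fun y => "\n" ++ y)) := by
  induction xs generalizing x with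
  | nil => simp [pvIntercalate, String.join]
  | cons y ys ih =>
    simp only [pvIntercalate, List.map]
    rw [pvJoin_cons, ih y]
    simp [String.append_assoc]

-- pvAppendLast keeps the section list nonempty
theorem pvAppendLast_ne_nil (secs : List (String × List String)) (it : String)
    (h : secs ≠ []) : pvAppendLast secs it ≠ [] := by
  cases secs with
  | nil => exact absurd rfl h
  | cons s rest => cases rest <;> simp [pvAppendLast]

theorem pvAppendLast_cons_ne (s : String × List String)
    (rest : List (String × List String)) (it : String) (h : rest ≠ []) :
    pvAppendLast (s :: rest) it = s :: pvAppendLast rest it := by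
  cases rest with
  | nil => exact absurd rfl h
  | cons s' rest' => rfl

-- append items to the last section (proof-side companion of pvAppendLast)
def pvAddItems : List (String × List String) → List String → List (String × List String)
  | [], _ => []
  | [s], l => [(s.1, s.2 ++ l)]
  | s :: s' :: rest, l => s :: pvAddItems (s' :: rest) l

theorem pvAddItems_cons_ne (s : String × List String)
    (rest : List (String × List String)) (l : List String) (h : rest ≠ []) :
    pvAddItems (s :: rest) l = s :: pvAddItems rest l := by
  cases rest with
  | nil => exact absurd rfl h
  | cons s' rest' => rfl

theorem pvAddItems_nil (secs : List (String × List String)) :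
    pvAddItems secs [] = secs := by
  induction secs with
  | nil => rfl
  | cons s rest ih => cases rest <;> simp_all [pvAddItems]

theorem pvAddItems_appendLast (secs : List (String × List String)) (it : String)
    (l : List String) (h : secs ≠ []) :
    pvAddItems (pvAppendLast secs it) l = pvAddItems secs (it :: l) := by
  induction secs with
  | nil => exact absurd rfl h
  | cons s rest ih =>
    cases rest with
    | nil => simp [pvAppendLast, pvAddItems]
    | cons s' rest' =>
      rw [pvAppendLast_cons_ne _ _ _ (by simp),
        pvAddItems_cons_ne _ _ _ (pvAppendLast_ne_nil _ _ (by simp)),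
        pvAddItems_cons_ne _ _ _ (by simp), ih (by simp)]

theorem pvAddItems_append_single (secs : List (String × List String))
    (hd : String) (l : List String) :
    pvAddItems (secs ++ [(hd, [])] ) l = secs ++ [(hd, l)] := by
  induction secs with
  | nil => simp [pvAddItems]
  | cons s rest ih =>
    rw [List.cons_append, pvAddItems_cons_ne _ _ _ (by simp), ih]
    simp

theorem pvA_fold (ls : List String) (acc : String) (ct : Option String) :
    ((ls.foldl (fun (st : String × Option String) line =>
      if PySem.Str.strip line = "" then st
      else if PySem.Str.endswith line ":" then
        ((if st.2.isSome then st.1 ++ "\n" else st.1) ++ line ++ "\n", some line)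
      else if PySem.Str.startswith line "  " then
        (st.1 ++ pvFmtItem (PySem.Str.strip line), st.2)
      else st) (acc, ct)).1) = acc ++ pvTailRender ct.isSome (pvGroup ls) := by
  induction ls generalizing acc ct with
  | nil =>
    simp [pvTailRender, pvGroup, pvJoinItems, String.join, pvIntercalate]
  | cons line ls ih =>
    cases ct with
    | none =>
      simp only [List.foldl, pvGroup, Option.isSome_none, Bool.false_eq_true,
        if_false, if_false]
      split_ifs with h1 h2 h3
      · exact ih acc none
      · rw [ih]
        simp [pvTailRender, pvRenderSec, pvJoinItems_nil,
          pvIntercalate_cons, Function.comp_def, String.append_assoc]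
      · rw [ih]
        simp [pvTailRender, pvJoinItems_cons, String.append_assoc]
      · exact ih acc none
    | some t =>
      simp only [List.foldl, pvGroup, Option.isSome_some, if_true]
      split_ifs with h1 h2 h3
      · exact ih acc (some t)
      · rw [ih]
        simp [pvTailRender, pvRenderSec, pvJoinItems_nil, pvJoin_cons,
          Function.comp_def, String.append_assoc]
      · rw [ih]
        simp [pvTailRender, pvJoinItems_cons, String.append_assoc]
      · exact ih acc (some t)

theorem pvB_fold_gen (ls : List String) (lead : List String)
    (secs : List (String × List String)) :
    (ls.foldl (fun (st : List String × List (String × List String)) line =>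
      if PySem.Str.strip line = "" then st
      else if PySem.Str.endswith line ":" then (st.1, st.2 ++ [(line, [])])
      else if PySem.Str.startswith line "  " then
        if st.2.isEmpty then (st.1 ++ [PySem.Str.strip line], st.2)
        else (st.1, pvAppendLast st.2 (PySem.Str.strip line))
      else st) (lead, secs)) =
    (if secs.isEmpty then (lead ++ (pvGroup ls).1, (pvGroup ls).2)
     else (lead, pvAddItems secs (pvGroup ls).1 ++ (pvGroup ls).2)) := by
  induction ls generalizing lead secs with
  | nil =>
    cases secs <;> simp [pvGroup, pvAddItems_nil]
  | cons line ls ih =>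
    simp only [List.foldl, pvGroup]
    cases secs with
    | nil =>
      simp only [List.isEmpty_nil, if_true]
      split_ifs with h1 h2 h3
      · rw [ih]; simp
      · rw [ih]
        simp [pvAddItems]
      · rw [ih]; simp
      · rw [ih]; simp
    | cons s rest =>
      simp only [List.isEmpty_cons, Bool.false_eq_true, if_false]
      split_ifs with h1 h2 h3
      · rw [ih]; simp
      · rw [ih]
        have hne : ((s :: rest) ++ [(line, [])]).isEmpty = false := by simp
        rw [hne]
        simp only [Bool.false_eq_true, if_false]
        rw [pvAddItems_append_single (s :: rest) line]
        simp [pvAddItems_nil]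
      · rw [ih]
        have hne : (pvAppendLast (s :: rest) (PySem.Str.strip line)).isEmpty = false := by
          have h := pvAppendLast_ne_nil (s :: rest) (PySem.Str.strip line) (by simp)
          cases hh : pvAppendLast (s :: rest) (PySem.Str.strip line) with
          | nil => exact absurd hh h
          | cons a b => simp
        rw [hne]
        simp only [Bool.false_eq_true, if_false]
        rw [pvAddItems_appendLast _ _ _ (by simp)]
      · rw [ih]; simp

-- ===== VERDICT (by name: the statement is the Claim_ definition above) =====
theorem format_inventory_display_spec : Claim_equal_format_inventory_display := by
  intro message _ _
  unfold Spec_format_inventory_display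
  simp only [format_inventory_display, format_inventory_display_alt]
  rw [pvA_fold, pvB_fold_gen]
  simp only [List.isEmpty_nil, if_true, List.nil_append, Option.isSome_none,
    pvTailRender, Bool.false_eq_true, if_false, String.append_assoc]
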